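-- pv_equiv track=rewrite | github.com/jsimmo45/Nematode-3D-Genome-PDE | hic_triangle_plots/plot_hic_triangle_heatmaps.py | get_somatic_region
-- ===== SOURCE A (Python) =====
-- def get_somatic_region(soma_chr_start, soma_chr_end, mappings):
--     """
--     Get the somatic chromosome range for post-PDE samples
--     Returns list of (chrom, start, end) tuples
--     Note: For somatic genome, we typically want full chromosomes
--     The end coordinate is approximate based on germline mapping
--     """
--     regions = []
--     in_range = False
--
--     # Get sorted chromosome list
--     chr_list = sorted([k for k in mappings.keys() if k.startswith('chr')],
--                      key=lambda x: (x.replace('chr0', 'chr').replace('chrX', 'chrZ'), x))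
--
--     for chr_name in chr_list:
--         if chr_name == soma_chr_start:
--             in_range = True
--
--         if in_range:
--             # For somatic genome, assume full chromosome
--             # Use a large end position (will be constrained by actual bin mapping)
--             regions.append((chr_name, 0, 1000000000))  # 1Gb max
--
--         if chr_name == soma_chr_end:
--             break
--
--     return regions
-- ===== SOURCE B (Python) =====
-- def get_somatic_region(soma_chr_start, soma_chr_end, mappings):
--     chr_list = sorted([k for k in mappings.keys() if k.startswith('chr')],
--                       key=lambda x: (x.replace('chr0', 'chr').replace('chrX', 'chrZ'), x))
--     try:
--         i = chr_list.index(soma_chr_start)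
--     except ValueError:
--         return []
--     j = chr_list.index(soma_chr_end) + 1 if soma_chr_end in chr_list else len(chr_list)
--     return [(c, 0, 1000000000) for c in chr_list[i:j]]
-- ===== Notes on version B (the rewrite author's own statement) =====
-- stated objective: simpler
-- what changed: A's stateful scan of the sorted chromosome list (in_range flag plus break) is replaced by computing the start/end marker indices once and taking a single slice; the sorted list construction is unchanged.
import Mathlib
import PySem

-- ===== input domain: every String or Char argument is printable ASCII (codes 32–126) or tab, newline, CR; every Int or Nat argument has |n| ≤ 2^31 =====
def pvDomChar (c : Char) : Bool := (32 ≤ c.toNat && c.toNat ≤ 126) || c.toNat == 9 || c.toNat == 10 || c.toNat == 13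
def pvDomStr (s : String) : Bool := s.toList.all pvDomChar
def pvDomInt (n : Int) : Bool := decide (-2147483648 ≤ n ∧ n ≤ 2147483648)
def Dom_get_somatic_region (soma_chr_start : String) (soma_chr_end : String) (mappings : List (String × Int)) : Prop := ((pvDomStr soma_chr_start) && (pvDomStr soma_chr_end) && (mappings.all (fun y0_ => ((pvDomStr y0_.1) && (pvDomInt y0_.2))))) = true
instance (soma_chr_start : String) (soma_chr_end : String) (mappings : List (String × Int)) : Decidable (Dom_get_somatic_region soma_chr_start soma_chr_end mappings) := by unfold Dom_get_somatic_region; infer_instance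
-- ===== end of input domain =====

-- B replaces A's stateful in_range/break scan of chr_list by an index/slice selection
-- (objective: simpler); the sorted chromosome-list construction is shared unchanged.

-- ===== PORT A =====
-- shared helper: chr_list = sorted([k for k in mappings.keys() if k.startswith('chr')], key=lambda x: (x.replace('chr0','chr').replace('chrX','chrZ'), x))
def chrKey (x : String) : String :=
  PySem.Str.replace (PySem.Str.replace x "chr0" "chr") "chrX" "chrZ"

def chrList (mappings : List (String × Int)) : List String :=
  PySem.List.sorted2
    (((PySem.Dict.ofList mappings).keys).filter (fun k => PySem.Str.startswith k "chr"))
    chrKey (fun x => x)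

-- A's for-loop over chr_list with the in_range flag and the break on soma_chr_end
def somaLoop (s e : String) : List String → Bool → List (String × Int × Int)
  | [], _ => []
  | c :: rest, inr =>
    let inr' := if c == s then true else inr
    let out := if inr' then [(c, (0 : Int), (1000000000 : Int))] else []
    if c == e then out else out ++ somaLoop s e rest inr'

def get_somatic_region (soma_chr_start : String) (soma_chr_end : String) (mappings : List (String × Int)) : List (String × Int × Int) :=
  somaLoop soma_chr_start soma_chr_end (chrList mappings) false

-- ===== PORT B =====
def get_somatic_region_alt (soma_chr_start : String) (soma_chr_end : String) (mappings : List (String × Int)) : List (String × Int × Int) :=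
  let cl := chrList mappings
  match PySem.List.index? cl soma_chr_start with
  | none => []
  | some i =>
    let j : Int := match PySem.List.index? cl soma_chr_end with
      | some k => (k : Int) + 1
      | none => (cl.length : Int)
    (PySem.List.slice cl (some (i : Int)) (some j)).map (fun c => (c, (0 : Int), (1000000000 : Int)))

-- ===== PRECONDITION & SPEC =====
def Spec_get_somatic_region (soma_chr_start : String) (soma_chr_end : String) (mappings : List (String × Int)) (out : List (String × Int × Int)) : Prop := out = get_somatic_region_alt soma_chr_start soma_chr_end mappings
instance (soma_chr_start : String) (soma_chr_end : String) (mappings : List (String × Int)) (out : List (String × Int × Int)) : Decidable (Spec_get_somatic_region soma_chr_start soma_chr_end mappings out) := by unfold Spec_get_somatic_region; infer_instance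

-- ===== CLAIM (what is proved, stated in full; the proofs are below) =====
def Claim_equal_get_somatic_region : Prop := ∀ (soma_chr_start : String) (soma_chr_end : String) (mappings : List (String × Int)), Dom_get_somatic_region soma_chr_start soma_chr_end mappings → Spec_get_somatic_region soma_chr_start soma_chr_end mappings (get_somatic_region soma_chr_start soma_chr_end mappings)

-- ===== LEMMAS AND PROOFS =====

-- how many leading elements the selection keeps: up to and including the first
-- occurrence of e, or the whole list when e is absent
def selLen (e : String) (l : List String) : Nat :=
  match List.idxOf? e l with
  | some k => k + 1
  | none => l.length

lemma selLen_cons_self (e : String) (r : List String) : selLen e (e :: r) = 1 := by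
  simp [selLen, List.idxOf?_cons]

lemma selLen_cons_ne (e c : String) (r : List String) (h : c ≠ e) :
    selLen e (c :: r) = selLen e r + 1 := by
  cases hk : List.idxOf? e r <;> simp [selLen, List.idxOf?_cons, h, hk]

lemma somaLoop_true (s e : String) (l : List String) :
    somaLoop s e l true =
      (l.take (selLen e l)).map (fun c => (c, (0 : Int), (1000000000 : Int))) := by
  induction l with
  | nil => simp [somaLoop]
  | cons c r ih =>
    by_cases hce : c = e
    · subst hce
      simp [somaLoop, selLen_cons_self]
    · rw [selLen_cons_ne e c r hce]
      simp [somaLoop, hce, ih]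

lemma somaLoop_false (s e : String) (l : List String) :
    somaLoop s e l false =
      match List.idxOf? s l with
      | none => []
      | some i =>
        ((l.take (selLen e l)).drop i).map (fun c => (c, (0 : Int), (1000000000 : Int))) := by
  induction l with
  | nil => simp [somaLoop]
  | cons c r ih =>
    by_cases hcs : c = s
    · subst hcs
      rw [List.idxOf?_cons]
      by_cases hce : c = e
      · subst hce
        simp [somaLoop, selLen_cons_self]
      · rw [selLen_cons_ne e c r hce]
        simp [somaLoop, hce, somaLoop_true c e r]
    · by_cases hce : c = e
      · subst hce
        cases hk : List.idxOf? s r with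
        | none => simp [somaLoop, hcs, List.idxOf?_cons, hk]
        | some i => simp [somaLoop, hcs, List.idxOf?_cons, hk, selLen_cons_self]
      · rw [selLen_cons_ne e c r hce]
        cases hk : List.idxOf? s r with
        | none => simp [somaLoop, hcs, hce, List.idxOf?_cons, hk, ih]
        | some i => simp [somaLoop, hcs, hce, List.idxOf?_cons, hk, ih]

lemma alt_slice_eq (e : String) (l : List String) (i : Nat) :
    PySem.List.slice l (some (i : Int))
      (some (match List.idxOf? e l with
             | some k => ((k : Int) + 1)
             | none => (l.length : Int))) =
      (l.take (selLen e l)).drop i := by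
  have hcast : (match List.idxOf? e l with
             | some k => ((k : Int) + 1)
             | none => (l.length : Int)) = ((selLen e l : Nat) : Int) := by
    cases hk : List.idxOf? e l <;> simp [selLen, hk]
  rw [hcast, PySem.List.slice_natCast, List.drop_take]

-- ===== VERDICT (by name: the statement is the Claim_ definition above) =====
theorem get_somatic_region_spec : Claim_equal_get_somatic_region := by
  intro s e m _
  unfold Spec_get_somatic_region get_somatic_region get_somatic_region_alt
  rw [somaLoop_false]
  simp only [PySem.List.index?_eq_idxOf?]
  cases List.idxOf? s (chrList m) with
  | none => simp
  | some i => simp [alt_slice_eq]
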